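-- pv_equiv track=rewrite | github.com/xnyuwg/fute | core/utils/util_structure.py | find_sorted_key_value_tuple_in_dict
-- ===== SOURCE A (Python) =====
-- def find_sorted_key_value_tuple_in_dict(dic: dict, default=[(0, 0)]):
--     max_value = None
--     max_elements = None
--     for k, v in dic.items():
--         if max_value is None:
--             max_value = v
--             max_elements = [(k, v)]
--         elif v > max_value:
--             max_value = v
--             max_elements = [(k, v)]
--         elif v == max_value:
--             max_elements.append((k, v))
--     if max_elements is None:
--         max_elements = default
--     if len(max_elements) > 1:
--         max_elements = sorted(max_elements, key=lambda x: x[0], reverse=True)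
--     return max_elements
-- ===== SOURCE B (Python) =====
-- def find_sorted_key_value_tuple_in_dict(dic: dict, default=[(0, 0)]):
--     if not dic:
--         return sorted(default, key=lambda x: x[0], reverse=True)
--     m = max(dic.values())
--     ties = [(k, v) for k, v in dic.items() if v == m]
--     return sorted(ties, key=lambda x: x[0], reverse=True)
-- ===== Notes on version B (the rewrite author's own statement) =====
-- stated objective: simpler
-- what changed: Replaces A's single fused loop maintaining a running max and a mutable tie list (with a conditional sort at the end) by three separate passes: max over the values, a comprehension filtering the ties, and an unconditional sort by key descending.
import Mathlib
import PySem

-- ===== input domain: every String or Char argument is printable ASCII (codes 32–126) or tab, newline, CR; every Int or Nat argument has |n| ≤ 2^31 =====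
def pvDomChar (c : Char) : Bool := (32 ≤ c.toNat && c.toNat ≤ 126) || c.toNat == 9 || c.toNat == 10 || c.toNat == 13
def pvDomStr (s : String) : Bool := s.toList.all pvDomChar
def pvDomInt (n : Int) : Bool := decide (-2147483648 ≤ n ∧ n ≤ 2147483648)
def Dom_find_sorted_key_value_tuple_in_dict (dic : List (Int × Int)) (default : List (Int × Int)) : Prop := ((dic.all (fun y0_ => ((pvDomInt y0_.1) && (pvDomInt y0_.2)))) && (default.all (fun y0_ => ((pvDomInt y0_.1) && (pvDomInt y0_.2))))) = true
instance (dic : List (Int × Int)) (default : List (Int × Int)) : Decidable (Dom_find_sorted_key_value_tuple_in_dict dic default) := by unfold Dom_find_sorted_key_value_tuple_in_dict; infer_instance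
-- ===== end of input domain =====

-- B: replaces A's fused running-max loop by three separate passes (max, filter, sort); objective: simpler.

-- ===== PORT A =====
-- one step of A's for-loop over dic.items(), on the state (max_value, max_elements)
def pvStepA (st : Option Int × Option (List (Int × Int))) (kv : Int × Int) :
    Option Int × Option (List (Int × Int)) :=
  match st.1 with
  | none => (some kv.2, some [kv])
  | some m =>
    if kv.2 > m then (some kv.2, some [kv])
    else if kv.2 = m then (some m, some ((st.2.getD []) ++ [kv]))
    else st

def find_sorted_key_value_tuple_in_dict (dic : List (Int × Int)) (default : List (Int × Int)) : List (Int × Int) :=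
  let st := dic.foldl pvStepA (none, none)
  let max_elements := match st.2 with
    | none => default
    | some es => es
  if max_elements.length > 1 then
    PySem.List.sorted max_elements (fun x => x.1) true
  else max_elements

-- ===== PORT B =====
def find_sorted_key_value_tuple_in_dict_alt (dic : List (Int × Int)) (default : List (Int × Int)) : List (Int × Int) :=
  if dic.isEmpty then PySem.List.sorted default (fun x => x.1) true
  else
    match PySem.List.max? (dic.map Prod.snd) (fun v => v) with
    | none => default  -- unreachable: dic is nonempty
    | some m => PySem.List.sorted (dic.filter (fun kv => kv.2 == m)) (fun x => x.1) true

-- ===== PRECONDITION & SPEC =====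
def Spec_find_sorted_key_value_tuple_in_dict (dic : List (Int × Int)) (default : List (Int × Int)) (out : List (Int × Int)) : Prop := out = find_sorted_key_value_tuple_in_dict_alt dic default
instance (dic : List (Int × Int)) (default : List (Int × Int)) (out : List (Int × Int)) : Decidable (Spec_find_sorted_key_value_tuple_in_dict dic default out) := by unfold Spec_find_sorted_key_value_tuple_in_dict; infer_instance

-- ===== CLAIM (what is proved, stated in full; the proofs are below) =====
def Claim_equal_find_sorted_key_value_tuple_in_dict : Prop := ∀ (dic : List (Int × Int)) (default : List (Int × Int)), Dom_find_sorted_key_value_tuple_in_dict dic default → Spec_find_sorted_key_value_tuple_in_dict dic default (find_sorted_key_value_tuple_in_dict dic default)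

-- ===== LEMMAS AND PROOFS =====

-- sorting a list of length ≤ 1 is the identity
lemma sorted_short (l : List (Int × Int)) (h : ¬ l.length > 1) :
    PySem.List.sorted l (fun x => x.1) true = l := by
  match l with
  | [] => rfl
  | [x] => rfl
  | a :: b :: t => exact absurd (by simp only [List.length_cons]; omega) h

-- invariant of A's loop once the state is (some m, some es)
lemma loopA_some (dic : List (Int × Int)) (m : Int) (es : List (Int × Int)) :
    dic.foldl pvStepA (some m, some es) =
      (some (dic.foldl (fun a kv => max a kv.2) m),
       some ((if dic.foldl (fun a kv => max a kv.2) m = m then es else [])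
              ++ dic.filter (fun kv => kv.2 == dic.foldl (fun a kv => max a kv.2) m))) := by
  induction dic generalizing m es with
  | nil => simp
  | cons kv rest ih =>
    have hmax : ∀ (a : Int) (l : List (Int × Int)), a ≤ l.foldl (fun a kv => max a kv.2) a := by
      intro a l
      exact (PySem.List.le_foldl_max_int l Prod.snd a).1
    simp only [List.foldl_cons, pvStepA]
    rcases lt_trichotomy kv.2 m with hlt | heq | hgt
    · -- kv.2 < m : state unchanged
      have h1 : ¬ kv.2 > m := by omega
      have h2 : kv.2 ≠ m := by omega
      simp only [h1, if_false, h2, if_false]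
      rw [ih]
      have hM : max m kv.2 = m := by omega
      have hMle : m ≤ rest.foldl (fun a kv => max a kv.2) m := hmax m rest
      have hne : kv.2 ≠ rest.foldl (fun a kv => max a kv.2) m := by omega
      simp [hM, hne]
    · -- kv.2 = m : appended to the tie list
      subst heq
      rw [if_neg (by omega : ¬ kv.2 > kv.2), if_pos rfl]
      simp only [Option.getD_some]
      rw [ih]
      simp only [max_self]
      by_cases hc : rest.foldl (fun a kv => max a kv.2) kv.2 = kv.2
      · simp [hc]
      · have hne : kv.2 ≠ rest.foldl (fun a kv => max a kv.2) kv.2 := fun h => hc h.symm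
        simp [hc, hne]
    · -- kv.2 > m : reset
      simp only [hgt, if_true]
      rw [ih]
      have hM : max m kv.2 = kv.2 := by omega
      have hMle : kv.2 ≤ rest.foldl (fun a kv => max a kv.2) kv.2 := hmax kv.2 rest
      have hnem : rest.foldl (fun a kv => max a kv.2) kv.2 ≠ m := by omega
      simp only [hM, hnem, if_false, List.nil_append]
      by_cases hc : rest.foldl (fun a kv => max a kv.2) kv.2 = kv.2
      · simp [hc]
      · have hne : kv.2 ≠ rest.foldl (fun a kv => max a kv.2) kv.2 := fun h => hc h.symm
        simp [hc, hne]

-- A on a nonempty dict computes the max-value ties in insertion order (before sorting)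
lemma loopA_cons (kv : Int × Int) (rest : List (Int × Int)) :
    (kv :: rest).foldl pvStepA ((none : Option Int), (none : Option (List (Int × Int)))) =
      (some (rest.foldl (fun a p => max a p.2) kv.2),
       some ((kv :: rest).filter (fun p => p.2 == rest.foldl (fun a p => max a p.2) kv.2))) := by
  have h0 : (kv :: rest).foldl pvStepA ((none : Option Int), none) =
      rest.foldl pvStepA (some kv.2, some [kv]) := by
    simp [pvStepA]
  rw [h0, loopA_some]
  set M := rest.foldl (fun a p => max a p.2) kv.2 with hMdef
  have hle : kv.2 ≤ M := (PySem.List.le_foldl_max_int rest Prod.snd kv.2).1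
  by_cases hc : M = kv.2
  · simp [hc]
  · have hne : kv.2 ≠ M := fun h => hc h.symm
    simp [hc, hne]

-- ===== VERDICT (by name: the statement is the Claim_ definition above) =====
theorem find_sorted_key_value_tuple_in_dict_spec : Claim_equal_find_sorted_key_value_tuple_in_dict := by
  intro dic default _
  unfold Spec_find_sorted_key_value_tuple_in_dict
  unfold find_sorted_key_value_tuple_in_dict find_sorted_key_value_tuple_in_dict_alt
  cases dic with
  | nil =>
    simp only [List.foldl_nil, List.isEmpty_nil, if_true]
    by_cases h : default.length > 1
    · simp [h]
    · simp [h, sorted_short default h]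
  | cons kv rest =>
    rw [loopA_cons]
    have hmax : PySem.List.max? ((kv :: rest).map Prod.snd) (fun v => v) =
        some (rest.foldl (fun a p => max a p.2) kv.2) := by
      rw [List.map_cons, PySem.List.max?_id_cons, List.foldl_map]
    simp only [List.isEmpty_cons, hmax]
    set ties := (kv :: rest).filter (fun p => p.2 == rest.foldl (fun a p => max a p.2) kv.2)
    by_cases h : ties.length > 1
    · simp [h]
    · simp [h, sorted_short ties h]
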